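-- pv_equiv track=rewrite | github.com/jonathonreilly/toy-physics | scripts/frontier_s3_pl_manifold.py | cubical_vertex_link_graph
-- ===== SOURCE A (Python) =====
-- def cubical_vertex_link_graph(v: tuple[int,int,int],
--                               sites_set: set) -> tuple[list, list]:
--     """
--     Compute the link of vertex v in the cubical complex of Z^3.
--
--     In a cubical complex, the link of a vertex v is the boundary of the
--     dual polytope restricted to the cubes containing v.
--
--     For an interior Z^3 vertex (degree 6), the link is the boundary of
--     the regular octahedron: 6 vertices (one per axis neighbor), 12 edges,
--     8 triangular faces.  This is combinatorially S^2.
--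
--     We compute this as a graph: vertices are the Z^3 neighbors of v that
--     are in sites_set; edges connect neighbors that share a common 2-cube
--     (face) containing v.
--
--     Two neighbors v+e_i and v+e_j (i != j) are connected in the link if
--     and only if the 2-face spanned by {v, v+e_i, v+e_j, v+e_i+e_j} has
--     all four corners in the cubical complex.  For the link of a VERTEX in
--     the cubical complex, the condition is that the cube face exists, which
--     requires all four vertices present.
--
--     Actually, for the combinatorial link in the cubical complex:
--     - Link vertices correspond to edges of the complex containing v
--       (= neighbors of v in Z^3 that are in sites_set)
--     - Link edges correspond to 2-faces of the complex containing v
--       (= pairs of neighbors v+e_i, v+e_j such that the square face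
--        {v, v+e_i, v+e_j, v+e_i+e_j} exists)
--     - Link 2-faces correspond to 3-cubes of the complex containing v
--       (= triples of neighbors v+e_i, v+e_j, v+e_k such that the unit
--        cube with corner at v in the (+e_i, +e_j, +e_k) octant exists)
--     """
--     x, y, z = v
--     # The 6 axis directions (positive and negative)
--     axis_dirs = [(1,0,0),(-1,0,0),(0,1,0),(0,-1,0),(0,0,1),(0,0,-1)]
--
--     # Link vertices = neighbors of v in the complex
--     link_verts = []
--     for d in axis_dirs:
--         nb = (x+d[0], y+d[1], z+d[2])
--         if nb in sites_set:
--             link_verts.append(d)  # store as direction from v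
--
--     # Link edges = pairs of neighbors sharing a 2-face through v
--     # Directions d1, d2 share a face if {v, v+d1, v+d2, v+d1+d2} all in complex
--     link_edges = []
--     for i, d1 in enumerate(link_verts):
--         for j, d2 in enumerate(link_verts):
--             if j <= i:
--                 continue
--             # d1 and d2 must be along different axes (can't be parallel)
--             if d1[0]*d2[0] + d1[1]*d2[1] + d1[2]*d2[2] != 0:
--                 continue  # parallel or anti-parallel, no shared face
--             # Check: v+d1+d2 in sites_set
--             corner = (x+d1[0]+d2[0], y+d1[1]+d2[1], z+d1[2]+d2[2])
--             if corner in sites_set: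
--                 link_edges.append((i, j))
--
--     # Link triangles = triples of neighbors spanning a 3-cube through v
--     link_triangles = []
--     for i, d1 in enumerate(link_verts):
--         for j, d2 in enumerate(link_verts):
--             if j <= i:
--                 continue
--             for k, d3 in enumerate(link_verts):
--                 if k <= j:
--                     continue
--                 # All three must be along different axes, none parallel
--                 dots = [d1[0]*d2[0]+d1[1]*d2[1]+d1[2]*d2[2],
--                         d1[0]*d3[0]+d1[1]*d3[1]+d1[2]*d3[2],
--                         d2[0]*d3[0]+d2[1]*d3[1]+d2[2]*d3[2]]
--                 if any(dot != 0 for dot in dots):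
--                     continue
--                 # Check all 7 points of the cube (besides v itself) are present
--                 pts = [
--                     (x+d1[0], y+d1[1], z+d1[2]),
--                     (x+d2[0], y+d2[1], z+d2[2]),
--                     (x+d3[0], y+d3[1], z+d3[2]),
--                     (x+d1[0]+d2[0], y+d1[1]+d2[1], z+d1[2]+d2[2]),
--                     (x+d1[0]+d3[0], y+d1[1]+d3[1], z+d1[2]+d3[2]),
--                     (x+d2[0]+d3[0], y+d2[1]+d3[1], z+d2[2]+d3[2]),
--                     (x+d1[0]+d2[0]+d3[0], y+d1[1]+d2[1]+d3[1], z+d1[2]+d2[2]+d3[2]),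
--                 ]
--                 if all(p in sites_set for p in pts):
--                     link_triangles.append((i, j, k))
--
--     return link_verts, link_edges, link_triangles
-- ===== SOURCE B (Python) =====
-- def cubical_vertex_link_graph(v, sites_set):
--     """Derive link triangles from adjacent pairs of already-built link edges
--     (plus the 3-cube's body corner) instead of re-testing 7 geometric points."""
--     x, y, z = v
--     axis_dirs = [(1,0,0),(-1,0,0),(0,1,0),(0,-1,0),(0,0,1),(0,0,-1)]
--
--     link_verts = [d for d in axis_dirs if (x+d[0], y+d[1], z+d[2]) in sites_set]
--
--     link_edges = []
--     for i, d1 in enumerate(link_verts):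
--         for j, d2 in enumerate(link_verts):
--             if j <= i:
--                 continue
--             if d1[0]*d2[0] + d1[1]*d2[1] + d1[2]*d2[2] != 0:
--                 continue
--             if (x+d1[0]+d2[0], y+d1[1]+d2[1], z+d1[2]+d2[2]) in sites_set:
--                 link_edges.append((i, j))
--
--     edge_set = set(link_edges)
--     link_triangles = []
--     for (i, j) in link_edges:
--         for (j2, k) in link_edges:
--             if j2 != j or (i, k) not in edge_set:
--                 continue
--             d1, d2, d3 = link_verts[i], link_verts[j], link_verts[k]
--             body = (x+d1[0]+d2[0]+d3[0], y+d1[1]+d2[1]+d3[1], z+d1[2]+d2[2]+d3[2])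
--             if body in sites_set:
--                 link_triangles.append((i, j, k))
--
--     return link_verts, link_edges, link_triangles
-- ===== Notes on version B (the rewrite author's own statement) =====
-- stated objective: alternative
-- what changed: B derives each link triangle from adjacent pairs of already-built link edges (an i-j edge followed by a j-k edge, with the i-k edge looked up in an edge set) plus one body-corner membership test, instead of A's triple loop over link vertices that re-checks pairwise dot products and 7 geometric points per triple.
import Mathlib
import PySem

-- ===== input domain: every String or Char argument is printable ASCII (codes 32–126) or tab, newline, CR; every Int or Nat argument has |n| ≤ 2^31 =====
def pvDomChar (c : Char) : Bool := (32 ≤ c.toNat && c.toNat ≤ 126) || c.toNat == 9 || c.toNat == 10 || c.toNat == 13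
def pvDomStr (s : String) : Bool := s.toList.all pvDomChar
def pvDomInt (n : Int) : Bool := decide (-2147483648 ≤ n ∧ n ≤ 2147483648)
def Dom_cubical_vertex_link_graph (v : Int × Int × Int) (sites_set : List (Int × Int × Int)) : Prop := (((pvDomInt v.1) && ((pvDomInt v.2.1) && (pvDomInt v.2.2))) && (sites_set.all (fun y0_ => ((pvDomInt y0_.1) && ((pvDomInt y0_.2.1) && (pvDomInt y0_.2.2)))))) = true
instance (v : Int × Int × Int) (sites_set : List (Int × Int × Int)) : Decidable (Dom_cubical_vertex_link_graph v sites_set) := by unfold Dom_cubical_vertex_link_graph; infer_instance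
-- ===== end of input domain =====

-- B derives the link triangles from adjacent pairs of already-built link edges (plus the 3-cube body
-- corner) instead of A's fresh 7-point geometric test per index triple; alternative decomposition, same cost.


-- ===== PORT A =====
-- one helper def per loop of A's Python, transliterated

def pvA_verts (x y z : Int) (sites_set : List (Int × Int × Int)) : List (Int × Int × Int) :=
  [((1:Int),(0:Int),(0:Int)), (-1,0,0), (0,1,0), (0,-1,0), (0,0,1), (0,0,-1)].foldl
    (fun acc d => if (x + d.1, y + d.2.1, z + d.2.2) ∈ sites_set then acc ++ [d] else acc) []

def pvA_edges (x y z : Int) (sites_set : List (Int × Int × Int))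
    (link_verts : List (Int × Int × Int)) : List (Int × Int) :=
  (PySem.List.enumerate link_verts).foldl (fun acc p =>
    (PySem.List.enumerate link_verts).foldl (fun acc q =>
      if q.1 ≤ p.1 then acc
      else if p.2.1 * q.2.1 + p.2.2.1 * q.2.2.1 + p.2.2.2 * q.2.2.2 ≠ 0 then acc
      else if (x + p.2.1 + q.2.1, y + p.2.2.1 + q.2.2.1, z + p.2.2.2 + q.2.2.2) ∈ sites_set
        then acc ++ [(p.1, q.1)] else acc) acc) []

def pvA_tris (x y z : Int) (sites_set : List (Int × Int × Int))
    (link_verts : List (Int × Int × Int)) : List (Int × Int × Int) :=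
  (PySem.List.enumerate link_verts).foldl (fun acc p =>
    (PySem.List.enumerate link_verts).foldl (fun acc q =>
      if q.1 ≤ p.1 then acc
      else (PySem.List.enumerate link_verts).foldl (fun acc r =>
        if r.1 ≤ q.1 then acc
        else
          let dots : List Int :=
            [p.2.1 * q.2.1 + p.2.2.1 * q.2.2.1 + p.2.2.2 * q.2.2.2,
             p.2.1 * r.2.1 + p.2.2.1 * r.2.2.1 + p.2.2.2 * r.2.2.2,
             q.2.1 * r.2.1 + q.2.2.1 * r.2.2.1 + q.2.2.2 * r.2.2.2]
          if dots.any (fun dot => dot != 0) then acc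
          else
            let pts : List (Int × Int × Int) :=
              [(x + p.2.1, y + p.2.2.1, z + p.2.2.2),
               (x + q.2.1, y + q.2.2.1, z + q.2.2.2),
               (x + r.2.1, y + r.2.2.1, z + r.2.2.2),
               (x + p.2.1 + q.2.1, y + p.2.2.1 + q.2.2.1, z + p.2.2.2 + q.2.2.2),
               (x + p.2.1 + r.2.1, y + p.2.2.1 + r.2.2.1, z + p.2.2.2 + r.2.2.2),
               (x + q.2.1 + r.2.1, y + q.2.2.1 + r.2.2.1, z + q.2.2.2 + r.2.2.2),
               (x + p.2.1 + q.2.1 + r.2.1, y + p.2.2.1 + q.2.2.1 + r.2.2.1, z + p.2.2.2 + q.2.2.2 + r.2.2.2)]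
            if pts.all (fun pt => decide (pt ∈ sites_set)) then acc ++ [(p.1, q.1, r.1)] else acc) acc) acc) []

def cubical_vertex_link_graph (v : Int × Int × Int) (sites_set : List (Int × Int × Int)) :
    (List (Int × Int × Int)) × (List (Int × Int)) × (List (Int × Int × Int)) :=
  let link_verts := pvA_verts v.1 v.2.1 v.2.2 sites_set
  (link_verts, pvA_edges v.1 v.2.1 v.2.2 sites_set link_verts,
   pvA_tris v.1 v.2.1 v.2.2 sites_set link_verts)

-- ===== PORT B =====
-- one helper def per loop of B's Python, transliterated

def pvB_verts (x y z : Int) (sites_set : List (Int × Int × Int)) : List (Int × Int × Int) :=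
  [((1:Int),(0:Int),(0:Int)), (-1,0,0), (0,1,0), (0,-1,0), (0,0,1), (0,0,-1)].filter
    (fun d => decide ((x + d.1, y + d.2.1, z + d.2.2) ∈ sites_set))

def pvB_edges (x y z : Int) (sites_set : List (Int × Int × Int))
    (link_verts : List (Int × Int × Int)) : List (Int × Int) :=
  (PySem.List.enumerate link_verts).foldl (fun acc p =>
    (PySem.List.enumerate link_verts).foldl (fun acc q =>
      if q.1 ≤ p.1 then acc
      else if p.2.1 * q.2.1 + p.2.2.1 * q.2.2.1 + p.2.2.2 * q.2.2.2 ≠ 0 then acc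
      else if (x + p.2.1 + q.2.1, y + p.2.2.1 + q.2.2.1, z + p.2.2.2 + q.2.2.2) ∈ sites_set
        then acc ++ [(p.1, q.1)] else acc) acc) []

def pvB_tris (x y z : Int) (sites_set : List (Int × Int × Int))
    (link_verts : List (Int × Int × Int)) (link_edges : List (Int × Int)) : List (Int × Int × Int) :=
  let edge_set : PySem.Set (Int × Int) := PySem.Set.ofList link_edges
  link_edges.foldl (fun acc e1 =>
    link_edges.foldl (fun acc e2 =>
      if e2.1 ≠ e1.2 ∨ (e1.1, e2.2) ∉ edge_set then acc
      else
        let d1 := PySem.List.pyGetD link_verts e1.1 (0, 0, 0)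
        let d2 := PySem.List.pyGetD link_verts e1.2 (0, 0, 0)
        let d3 := PySem.List.pyGetD link_verts e2.2 (0, 0, 0)
        if (x + d1.1 + d2.1 + d3.1, y + d1.2.1 + d2.2.1 + d3.2.1, z + d1.2.2 + d2.2.2 + d3.2.2) ∈ sites_set
          then acc ++ [(e1.1, e1.2, e2.2)] else acc) acc) []

def cubical_vertex_link_graph_alt (v : Int × Int × Int) (sites_set : List (Int × Int × Int)) :
    (List (Int × Int × Int)) × (List (Int × Int)) × (List (Int × Int × Int)) :=
  let link_verts := pvB_verts v.1 v.2.1 v.2.2 sites_set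
  let link_edges := pvB_edges v.1 v.2.1 v.2.2 sites_set link_verts
  (link_verts, link_edges, pvB_tris v.1 v.2.1 v.2.2 sites_set link_verts link_edges)

-- ===== PRECONDITION & SPEC =====
def Spec_cubical_vertex_link_graph (v : Int × Int × Int) (sites_set : List (Int × Int × Int)) (out : (List (Int × Int × Int)) × (List (Int × Int)) × (List (Int × Int × Int))) : Prop := out = cubical_vertex_link_graph_alt v sites_set
instance (v : Int × Int × Int) (sites_set : List (Int × Int × Int)) (out : (List (Int × Int × Int)) × (List (Int × Int)) × (List (Int × Int × Int))) : Decidable (Spec_cubical_vertex_link_graph v sites_set out) := by unfold Spec_cubical_vertex_link_graph; infer_instance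

-- ===== CLAIM (what is proved, stated in full; the proofs are below) =====
def Claim_equal_cubical_vertex_link_graph : Prop := ∀ (v : Int × Int × Int) (sites_set : List (Int × Int × Int)), Dom_cubical_vertex_link_graph v sites_set → Spec_cubical_vertex_link_graph v sites_set (cubical_vertex_link_graph v sites_set)

-- ===== LEMMAS AND PROOFS =====

-- proof-side abbreviations
def pvDot (a b : Int × Int × Int) : Int := a.1 * b.1 + a.2.1 * b.2.1 + a.2.2 * b.2.2
def pvP1 (x y z : Int) (d : Int × Int × Int) : Int × Int × Int := (x + d.1, y + d.2.1, z + d.2.2)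
def pvP2 (x y z : Int) (d e : Int × Int × Int) : Int × Int × Int :=
  (x + d.1 + e.1, y + d.2.1 + e.2.1, z + d.2.2 + e.2.2)
def pvP3 (x y z : Int) (d e f : Int × Int × Int) : Int × Int × Int :=
  (x + d.1 + e.1 + f.1, y + d.2.1 + e.2.1 + f.2.1, z + d.2.2 + e.2.2 + f.2.2)

-- flatMap normal form of the (shared) edge loop
def pvE (x y z : Int) (s : List (Int × Int × Int)) (lv : List (Int × Int × Int)) : List (Int × Int) :=
  (PySem.List.enumerate lv).flatMap (fun p =>
    (PySem.List.enumerate lv).flatMap (fun q =>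
      if p.1 < q.1 ∧ pvDot p.2 q.2 = 0 ∧ pvP2 x y z p.2 q.2 ∈ s then [(p.1, q.1)] else []))

-- flatMap normal form of A's triangle loop
def pvTA (x y z : Int) (s : List (Int × Int × Int)) (lv : List (Int × Int × Int)) : List (Int × Int × Int) :=
  (PySem.List.enumerate lv).flatMap (fun p =>
    (PySem.List.enumerate lv).flatMap (fun q =>
      if q.1 ≤ p.1 then []
      else (PySem.List.enumerate lv).flatMap (fun r =>
        if q.1 < r.1 ∧ pvDot p.2 q.2 = 0 ∧ pvDot p.2 r.2 = 0 ∧ pvDot q.2 r.2 = 0 ∧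
           pvP1 x y z p.2 ∈ s ∧ pvP1 x y z q.2 ∈ s ∧ pvP1 x y z r.2 ∈ s ∧
           pvP2 x y z p.2 q.2 ∈ s ∧ pvP2 x y z p.2 r.2 ∈ s ∧ pvP2 x y z q.2 r.2 ∈ s ∧
           pvP3 x y z p.2 q.2 r.2 ∈ s
        then [(p.1, q.1, r.1)] else [])))

-- flatMap normal form of B's triangle loop
def pvTB (x y z : Int) (s : List (Int × Int × Int)) (lv : List (Int × Int × Int))
    (le : List (Int × Int)) : List (Int × Int × Int) :=
  le.flatMap (fun e1 => le.flatMap (fun e2 =>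
    if e2.1 = e1.2 ∧ (e1.1, e2.2) ∈ PySem.Set.ofList le ∧
       pvP3 x y z (PySem.List.pyGetD lv e1.1 (0,0,0)) (PySem.List.pyGetD lv e1.2 (0,0,0))
         (PySem.List.pyGetD lv e2.2 (0,0,0)) ∈ s
    then [(e1.1, e1.2, e2.2)] else []))

lemma pvA_verts_eq (x y z : Int) (s : List (Int × Int × Int)) :
    pvA_verts x y z s = pvB_verts x y z s := by
  unfold pvA_verts pvB_verts
  rw [PySem.List.foldl_append_ite_eq_filter]
  simp

lemma pvA_edges_eq (x y z : Int) (s lv : List (Int × Int × Int)) :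
    pvA_edges x y z s lv = pvE x y z s lv := by
  unfold pvA_edges pvE
  have hin : ∀ (p : Int × (Int × Int × Int)) (acc : List (Int × Int)),
      (PySem.List.enumerate lv).foldl (fun acc q =>
        if q.1 ≤ p.1 then acc
        else if p.2.1 * q.2.1 + p.2.2.1 * q.2.2.1 + p.2.2.2 * q.2.2.2 ≠ 0 then acc
        else if (x + p.2.1 + q.2.1, y + p.2.2.1 + q.2.2.1, z + p.2.2.2 + q.2.2.2) ∈ s
          then acc ++ [(p.1, q.1)] else acc) acc
      = acc ++ (PySem.List.enumerate lv).flatMap (fun q =>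
          if p.1 < q.1 ∧ pvDot p.2 q.2 = 0 ∧ pvP2 x y z p.2 q.2 ∈ s then [(p.1, q.1)] else []) := by
    intro p acc
    refine (PySem.List.foldl_congr_mem _ _ (fun acc q => acc ++
        (if p.1 < q.1 ∧ pvDot p.2 q.2 = 0 ∧ pvP2 x y z p.2 q.2 ∈ s then [(p.1, q.1)] else [])) _
        ?_).trans (PySem.List.foldl_append_eq_flatMap _ _ _)
    intro acc q _
    simp only [pvDot, pvP2]
    split_ifs <;> simp_all <;> omega
  refine ((PySem.List.foldl_congr_mem _ _ (fun acc p => acc ++ (PySem.List.enumerate lv).flatMap (fun q =>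
      if p.1 < q.1 ∧ pvDot p.2 q.2 = 0 ∧ pvP2 x y z p.2 q.2 ∈ s then [(p.1, q.1)] else [])) _
      (fun acc p _ => hin p acc)).trans (PySem.List.foldl_append_eq_flatMap _ _ _)).trans (by simp)

lemma pvB_edges_eq (x y z : Int) (s lv : List (Int × Int × Int)) :
    pvB_edges x y z s lv = pvE x y z s lv := pvA_edges_eq x y z s lv

lemma pvA_tris_eq (x y z : Int) (s lv : List (Int × Int × Int)) :
    pvA_tris x y z s lv = pvTA x y z s lv := by
  unfold pvA_tris pvTA
  have hin1 : ∀ (p q : Int × (Int × Int × Int)) (acc : List (Int × Int × Int)),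
      (PySem.List.enumerate lv).foldl (fun acc r =>
        if r.1 ≤ q.1 then acc
        else
          let dots : List Int :=
            [p.2.1 * q.2.1 + p.2.2.1 * q.2.2.1 + p.2.2.2 * q.2.2.2,
             p.2.1 * r.2.1 + p.2.2.1 * r.2.2.1 + p.2.2.2 * r.2.2.2,
             q.2.1 * r.2.1 + q.2.2.1 * r.2.2.1 + q.2.2.2 * r.2.2.2]
          if dots.any (fun dot => dot != 0) then acc
          else
            let pts : List (Int × Int × Int) :=
              [(x + p.2.1, y + p.2.2.1, z + p.2.2.2),
               (x + q.2.1, y + q.2.2.1, z + q.2.2.2),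
               (x + r.2.1, y + r.2.2.1, z + r.2.2.2),
               (x + p.2.1 + q.2.1, y + p.2.2.1 + q.2.2.1, z + p.2.2.2 + q.2.2.2),
               (x + p.2.1 + r.2.1, y + p.2.2.1 + r.2.2.1, z + p.2.2.2 + r.2.2.2),
               (x + q.2.1 + r.2.1, y + q.2.2.1 + r.2.2.1, z + q.2.2.2 + r.2.2.2),
               (x + p.2.1 + q.2.1 + r.2.1, y + p.2.2.1 + q.2.2.1 + r.2.2.1, z + p.2.2.2 + q.2.2.2 + r.2.2.2)]
            if pts.all (fun pt => decide (pt ∈ s)) then acc ++ [(p.1, q.1, r.1)] else acc) acc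
      = acc ++ (PySem.List.enumerate lv).flatMap (fun r =>
          if q.1 < r.1 ∧ pvDot p.2 q.2 = 0 ∧ pvDot p.2 r.2 = 0 ∧ pvDot q.2 r.2 = 0 ∧
             pvP1 x y z p.2 ∈ s ∧ pvP1 x y z q.2 ∈ s ∧ pvP1 x y z r.2 ∈ s ∧
             pvP2 x y z p.2 q.2 ∈ s ∧ pvP2 x y z p.2 r.2 ∈ s ∧ pvP2 x y z q.2 r.2 ∈ s ∧
             pvP3 x y z p.2 q.2 r.2 ∈ s
          then [(p.1, q.1, r.1)] else []) := by
    intro p q acc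
    refine (PySem.List.foldl_congr_mem _ _ (fun acc r => acc ++
        (if q.1 < r.1 ∧ pvDot p.2 q.2 = 0 ∧ pvDot p.2 r.2 = 0 ∧ pvDot q.2 r.2 = 0 ∧
             pvP1 x y z p.2 ∈ s ∧ pvP1 x y z q.2 ∈ s ∧ pvP1 x y z r.2 ∈ s ∧
             pvP2 x y z p.2 q.2 ∈ s ∧ pvP2 x y z p.2 r.2 ∈ s ∧ pvP2 x y z q.2 r.2 ∈ s ∧
             pvP3 x y z p.2 q.2 r.2 ∈ s
         then [(p.1, q.1, r.1)] else [])) _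
        ?_).trans (PySem.List.foldl_append_eq_flatMap _ _ _)
    intro acc r _
    simp only [pvDot, pvP1, pvP2, pvP3, List.any_cons, List.any_nil, List.all_cons, List.all_nil,
      Bool.or_false, Bool.and_true, bne_iff_ne, Bool.or_eq_true, decide_eq_true_eq, Bool.and_eq_true]
    split_ifs <;> simp_all <;> omega
  have hin2 : ∀ (p : Int × (Int × Int × Int)) (acc : List (Int × Int × Int)),
      (PySem.List.enumerate lv).foldl (fun acc q =>
        if q.1 ≤ p.1 then acc
        else (PySem.List.enumerate lv).foldl (fun acc r =>
          if r.1 ≤ q.1 then acc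
          else
            let dots : List Int :=
              [p.2.1 * q.2.1 + p.2.2.1 * q.2.2.1 + p.2.2.2 * q.2.2.2,
               p.2.1 * r.2.1 + p.2.2.1 * r.2.2.1 + p.2.2.2 * r.2.2.2,
               q.2.1 * r.2.1 + q.2.2.1 * r.2.2.1 + q.2.2.2 * r.2.2.2]
            if dots.any (fun dot => dot != 0) then acc
            else
              let pts : List (Int × Int × Int) :=
                [(x + p.2.1, y + p.2.2.1, z + p.2.2.2),
                 (x + q.2.1, y + q.2.2.1, z + q.2.2.2),
                 (x + r.2.1, y + r.2.2.1, z + r.2.2.2),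
                 (x + p.2.1 + q.2.1, y + p.2.2.1 + q.2.2.1, z + p.2.2.2 + q.2.2.2),
                 (x + p.2.1 + r.2.1, y + p.2.2.1 + r.2.2.1, z + p.2.2.2 + r.2.2.2),
                 (x + q.2.1 + r.2.1, y + q.2.2.1 + r.2.2.1, z + q.2.2.2 + r.2.2.2),
                 (x + p.2.1 + q.2.1 + r.2.1, y + p.2.2.1 + q.2.2.1 + r.2.2.1, z + p.2.2.2 + q.2.2.2 + r.2.2.2)]
              if pts.all (fun pt => decide (pt ∈ s)) then acc ++ [(p.1, q.1, r.1)] else acc) acc) acc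
      = acc ++ (PySem.List.enumerate lv).flatMap (fun q =>
          if q.1 ≤ p.1 then []
          else (PySem.List.enumerate lv).flatMap (fun r =>
            if q.1 < r.1 ∧ pvDot p.2 q.2 = 0 ∧ pvDot p.2 r.2 = 0 ∧ pvDot q.2 r.2 = 0 ∧
               pvP1 x y z p.2 ∈ s ∧ pvP1 x y z q.2 ∈ s ∧ pvP1 x y z r.2 ∈ s ∧
               pvP2 x y z p.2 q.2 ∈ s ∧ pvP2 x y z p.2 r.2 ∈ s ∧ pvP2 x y z q.2 r.2 ∈ s ∧
               pvP3 x y z p.2 q.2 r.2 ∈ s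
            then [(p.1, q.1, r.1)] else [])) := by
    intro p acc
    refine (PySem.List.foldl_congr_mem _ _ (fun acc q => acc ++
        (if q.1 ≤ p.1 then []
         else (PySem.List.enumerate lv).flatMap (fun r =>
            if q.1 < r.1 ∧ pvDot p.2 q.2 = 0 ∧ pvDot p.2 r.2 = 0 ∧ pvDot q.2 r.2 = 0 ∧
               pvP1 x y z p.2 ∈ s ∧ pvP1 x y z q.2 ∈ s ∧ pvP1 x y z r.2 ∈ s ∧
               pvP2 x y z p.2 q.2 ∈ s ∧ pvP2 x y z p.2 r.2 ∈ s ∧ pvP2 x y z q.2 r.2 ∈ s ∧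
               pvP3 x y z p.2 q.2 r.2 ∈ s
            then [(p.1, q.1, r.1)] else []))) _
        ?_).trans (PySem.List.foldl_append_eq_flatMap _ _ _)
    intro acc q _
    by_cases hq : q.1 ≤ p.1
    · simp [hq]
    · simp only [hq, if_false]
      exact hin1 p q acc
  refine ((PySem.List.foldl_congr_mem _ _ (fun acc p => acc ++ (PySem.List.enumerate lv).flatMap (fun q =>
      if q.1 ≤ p.1 then []
      else (PySem.List.enumerate lv).flatMap (fun r =>
        if q.1 < r.1 ∧ pvDot p.2 q.2 = 0 ∧ pvDot p.2 r.2 = 0 ∧ pvDot q.2 r.2 = 0 ∧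
           pvP1 x y z p.2 ∈ s ∧ pvP1 x y z q.2 ∈ s ∧ pvP1 x y z r.2 ∈ s ∧
           pvP2 x y z p.2 q.2 ∈ s ∧ pvP2 x y z p.2 r.2 ∈ s ∧ pvP2 x y z q.2 r.2 ∈ s ∧
           pvP3 x y z p.2 q.2 r.2 ∈ s
        then [(p.1, q.1, r.1)] else []))) _
      (fun acc p _ => hin2 p acc)).trans (PySem.List.foldl_append_eq_flatMap _ _ _)).trans (by simp)

lemma pvB_tris_eq (x y z : Int) (s lv : List (Int × Int × Int)) (le : List (Int × Int)) :
    pvB_tris x y z s lv le = pvTB x y z s lv le := by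
  unfold pvB_tris pvTB
  simp only
  have hin : ∀ (e1 : Int × Int) (acc : List (Int × Int × Int)),
      le.foldl (fun acc e2 =>
        if e2.1 ≠ e1.2 ∨ (e1.1, e2.2) ∉ PySem.Set.ofList le then acc
        else
          let d1 := PySem.List.pyGetD lv e1.1 (0, 0, 0)
          let d2 := PySem.List.pyGetD lv e1.2 (0, 0, 0)
          let d3 := PySem.List.pyGetD lv e2.2 (0, 0, 0)
          if (x + d1.1 + d2.1 + d3.1, y + d1.2.1 + d2.2.1 + d3.2.1, z + d1.2.2 + d2.2.2 + d3.2.2) ∈ s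
            then acc ++ [(e1.1, e1.2, e2.2)] else acc) acc
      = acc ++ le.flatMap (fun e2 =>
          if e2.1 = e1.2 ∧ (e1.1, e2.2) ∈ PySem.Set.ofList le ∧
             pvP3 x y z (PySem.List.pyGetD lv e1.1 (0,0,0)) (PySem.List.pyGetD lv e1.2 (0,0,0))
               (PySem.List.pyGetD lv e2.2 (0,0,0)) ∈ s
          then [(e1.1, e1.2, e2.2)] else []) := by
    intro e1 acc
    refine (PySem.List.foldl_congr_mem _ _ (fun acc e2 => acc ++
        (if e2.1 = e1.2 ∧ (e1.1, e2.2) ∈ PySem.Set.ofList le ∧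
             pvP3 x y z (PySem.List.pyGetD lv e1.1 (0,0,0)) (PySem.List.pyGetD lv e1.2 (0,0,0))
               (PySem.List.pyGetD lv e2.2 (0,0,0)) ∈ s
         then [(e1.1, e1.2, e2.2)] else [])) _
        ?_).trans (PySem.List.foldl_append_eq_flatMap _ _ _)
    intro acc e2 _
    simp only [pvP3]
    split_ifs <;> simp_all
  refine ((PySem.List.foldl_congr_mem _ _ (fun acc e1 => acc ++ le.flatMap (fun e2 =>
      if e2.1 = e1.2 ∧ (e1.1, e2.2) ∈ PySem.Set.ofList le ∧
         pvP3 x y z (PySem.List.pyGetD lv e1.1 (0,0,0)) (PySem.List.pyGetD lv e1.2 (0,0,0))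
           (PySem.List.pyGetD lv e2.2 (0,0,0)) ∈ s
      then [(e1.1, e1.2, e2.2)] else [])) _
      (fun acc e1 _ => hin e1 acc)).trans (PySem.List.foldl_append_eq_flatMap _ _ _)).trans (by simp)

-- collapse: a flatMap over enumerate whose body vanishes except at one index
lemma pvFlatMap_enumerate_single {α β : Type} (xs : List α) (st : Int) (j : Nat)
    (hj : j < xs.length) (F : Int × α → List β)
    (hF : ∀ q, q.1 ≠ st + (j : Int) → F q = []) :
    (PySem.List.enumerate xs st).flatMap F = F (st + (j : Int), xs[j]) := by
  induction xs generalizing st j with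
  | nil => simp at hj
  | cons x t ih =>
    rw [PySem.List.enumerate_cons, List.flatMap_cons]
    cases j with
    | zero =>
      have h2 : (PySem.List.enumerate t (st + 1)).flatMap F = [] := by
        rw [List.flatMap_eq_nil_iff]
        intro q hq
        rw [PySem.List.mem_enumerate_iff] at hq
        obtain ⟨k, hk, rfl⟩ := hq
        exact hF _ (by push_cast; omega)
      simp [h2]
    | succ m =>
      have h1 : F (st, x) = [] := hF _ (by push_cast; omega)
      have h2 := ih (st + 1) m (by simpa using hj)
        (fun q hq => hF q (by push_cast at hq ⊢; omega))
      rw [h1, List.nil_append, h2]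
      congr 1
      simp [Prod.ext_iff]
      ring

lemma pvMem_pvE (x y z : Int) (s lv : List (Int × Int × Int)) (a b : Int) :
    (a, b) ∈ pvE x y z s lv ↔
      ∃ (k₁ k₂ : Nat) (h₁ : k₁ < lv.length) (h₂ : k₂ < lv.length),
        a = (k₁ : Int) ∧ b = (k₂ : Int) ∧ k₁ < k₂ ∧ pvDot lv[k₁] lv[k₂] = 0 ∧
        pvP2 x y z lv[k₁] lv[k₂] ∈ s := by
  unfold pvE
  simp only [List.mem_flatMap, PySem.List.mem_enumerate_iff]
  constructor
  · rintro ⟨p, ⟨k₁, h₁, rfl⟩, q, ⟨k₂, h₂, rfl⟩, hmem⟩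
    split_ifs at hmem with hc
    · simp only [List.mem_singleton, Prod.mk.injEq] at hmem
      obtain ⟨rfl, rfl⟩ := hmem
      exact ⟨k₁, k₂, h₁, h₂, by omega, by omega,
        by have := hc.1; omega, hc.2.1, hc.2.2⟩
    · simp at hmem
  · rintro ⟨k₁, k₂, h₁, h₂, rfl, rfl, hlt, hdot, hpt⟩
    refine ⟨(0 + (k₁:Int), lv[k₁]), ⟨k₁, h₁, rfl⟩, (0 + (k₂:Int), lv[k₂]), ⟨k₂, h₂, rfl⟩, ?_⟩
    rw [if_pos ⟨by omega, hdot, hpt⟩]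
    simp

lemma pvE_flatMap_split {b : Type} (x y z : Int) (s lv : List (Int × Int × Int)) (F : Int × Int → List b) :
    (pvE x y z s lv).flatMap F =
      (PySem.List.enumerate lv).flatMap (fun p => (PySem.List.enumerate lv).flatMap (fun q =>
        if p.1 < q.1 ∧ pvDot p.2 q.2 = 0 ∧ pvP2 x y z p.2 q.2 ∈ s then F (p.1, q.1) else [])) := by
  unfold pvE
  rw [List.flatMap_assoc]
  refine List.flatMap_congr ?_
  intro p hp
  rw [List.flatMap_assoc]
  refine List.flatMap_congr ?_
  intro q hq
  by_cases hc : p.1 < q.1 ∧ pvDot p.2 q.2 = 0 ∧ pvP2 x y z p.2 q.2 ∈ s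
  · simp [hc]
  · simp [hc]

lemma pvTri_core (x y z : Int) (s lv : List (Int × Int × Int))
    (hlv : ∀ d ∈ lv, pvP1 x y z d ∈ s) :
    pvTA x y z s lv = pvTB x y z s lv (pvE x y z s lv) := by
  have hg : ∀ (k : Nat) (h : k < lv.length), PySem.List.pyGetD lv ((k : Int)) ((0:Int),(0:Int),(0:Int)) = lv[k] := by
    intro k h
    rw [PySem.List.pyGetD_natCast]
    exact List.getD_eq_getElem _ _ h
  unfold pvTA pvTB
  rw [pvE_flatMap_split]
  refine List.flatMap_congr ?_
  intro p hp
  have hp' := hp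
  rw [PySem.List.mem_enumerate_iff] at hp'
  obtain ⟨k₁, h₁, rfl⟩ := hp'
  refine List.flatMap_congr ?_
  intro q hq
  have hq' := hq
  rw [PySem.List.mem_enumerate_iff] at hq'
  obtain ⟨k₂, h₂, rfl⟩ := hq'
  simp only [zero_add]
  rw [hg k₁ h₁, hg k₂ h₂]
  by_cases hk : (k₁ : Int) < (k₂ : Int)
  · rw [if_neg (by omega)]
    by_cases hc : pvDot lv[k₁] lv[k₂] = 0 ∧ pvP2 x y z lv[k₁] lv[k₂] ∈ s
    · rw [if_pos ⟨hk, hc.1, hc.2⟩, pvE_flatMap_split]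
      refine Eq.trans ?_ (pvFlatMap_enumerate_single lv 0 k₂ h₂ _ ?_).symm
      · simp only [zero_add]
        refine List.flatMap_congr ?_
        intro r hr
        rw [PySem.List.mem_enumerate_iff] at hr
        obtain ⟨k₃, h₃, rfl⟩ := hr
        simp only [zero_add]
        rw [hg k₃ h₃]
        have hP11 : pvP1 x y z lv[k₁] ∈ s := hlv _ (List.getElem_mem h₁)
        have hP12 : pvP1 x y z lv[k₂] ∈ s := hlv _ (List.getElem_mem h₂)
        have hP13 : pvP1 x y z lv[k₃] ∈ s := hlv _ (List.getElem_mem h₃)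
        have hmemE : ((k₁ : Int), (k₃ : Int)) ∈ PySem.Set.ofList (pvE x y z s lv) ↔
            ((k₁ : Int) < (k₃ : Int) ∧ pvDot lv[k₁] lv[k₃] = 0 ∧ pvP2 x y z lv[k₁] lv[k₃] ∈ s) := by
          rw [PySem.Set.mem_ofList, pvMem_pvE]
          constructor
          · rintro ⟨a, b, ha, hb, e1, e2, h3, h4, h5⟩
            have ha' : a = k₁ := by omega
            have hb' : b = k₃ := by omega
            subst ha' hb'
            exact ⟨by omega, h4, h5⟩
          · rintro ⟨h1, h2, h3⟩
            exact ⟨k₁, k₃, h₁, h₃, rfl, rfl, by omega, h2, h3⟩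
        by_cases h23 : (k₂ : Int) < (k₃ : Int)
        · have h13 : (k₁ : Int) < (k₃ : Int) := by omega
          by_cases hd13 : pvDot lv[k₁] lv[k₃] = 0 <;>
            by_cases hd23 : pvDot lv[k₂] lv[k₃] = 0 <;>
            by_cases hp13 : pvP2 x y z lv[k₁] lv[k₃] ∈ s <;>
            by_cases hp23 : pvP2 x y z lv[k₂] lv[k₃] ∈ s <;>
            by_cases hb : pvP3 x y z lv[k₁] lv[k₂] lv[k₃] ∈ s <;>
            simp [h23, h13, hc.1, hc.2, hP11, hP12, hP13, hd13, hd23, hp13, hp23, hb, hmemE]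
        · simp [h23]
      · intro q' hne
        rw [List.flatMap_eq_nil_iff]
        intro r _
        rw [zero_add] at hne
        split_ifs with hA hB
        · exact absurd hB.1 hne
        · rfl
        · rfl
    · rw [if_neg (by tauto), List.flatMap_eq_nil_iff]
      intro r hr
      rw [if_neg (by tauto)]
  · rw [if_pos (by omega), if_neg (fun h => absurd h.1 hk)]

lemma pvTri_main (x y z : Int) (s : List (Int × Int × Int)) :
    pvTA x y z s (pvB_verts x y z s) =
      pvTB x y z s (pvB_verts x y z s) (pvE x y z s (pvB_verts x y z s)) := by
  refine pvTri_core x y z s _ ?_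
  intro d hd
  unfold pvB_verts at hd
  rw [List.mem_filter] at hd
  have := hd.2
  simp only [decide_eq_true_eq] at this
  exact this

-- ===== VERDICT (by name: the statement is the Claim_ definition above) =====
theorem cubical_vertex_link_graph_spec : Claim_equal_cubical_vertex_link_graph := by
  intro v s _
  unfold Spec_cubical_vertex_link_graph cubical_vertex_link_graph cubical_vertex_link_graph_alt
  obtain ⟨x, y, z⟩ := v
  simp only
  rw [pvA_verts_eq, pvA_tris_eq, pvB_tris_eq, pvA_edges_eq, pvB_edges_eq, pvTri_main]
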